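-- pv_equiv track=rewrite | github.com/joominchul/codingTestJoo | Lv.1 개인정보 수집 유효기간.py | cal_month
-- ===== SOURCE A (Python) =====
-- def cal_month(year, month, day): #유효기간을 더한 날짜를 알맞게 설정
--     if day == 1:
--         month -= 1
--         day = 28
--     else:
--         day -= 1
--     while month > 12:       #유효기간을 더한 월을 알맞게 설정
--         month -= 12
--         year += 1
--     if month == 0:
--         month = 12
--         year -= 1
--     return [year, month, day]
-- ===== SOURCE B (Python) =====
-- def cal_month(year, month, day):
--     if day == 1:
--         month, day = month - 1, 28
--     else:
--         day -= 1
--     if month > 12 or month == 0: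
--         year += (month - 1) // 12
--         month = (month - 1) % 12 + 1
--     return [year, month, day]
-- ===== Notes on version B (the rewrite author's own statement) =====
-- stated objective: simpler
-- what changed: The repeated-subtraction while loop and the separate month==0 fix-up are replaced by one constant-time floor-division/modulo normalization applied when the month is 0 or above 12.
import Mathlib
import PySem

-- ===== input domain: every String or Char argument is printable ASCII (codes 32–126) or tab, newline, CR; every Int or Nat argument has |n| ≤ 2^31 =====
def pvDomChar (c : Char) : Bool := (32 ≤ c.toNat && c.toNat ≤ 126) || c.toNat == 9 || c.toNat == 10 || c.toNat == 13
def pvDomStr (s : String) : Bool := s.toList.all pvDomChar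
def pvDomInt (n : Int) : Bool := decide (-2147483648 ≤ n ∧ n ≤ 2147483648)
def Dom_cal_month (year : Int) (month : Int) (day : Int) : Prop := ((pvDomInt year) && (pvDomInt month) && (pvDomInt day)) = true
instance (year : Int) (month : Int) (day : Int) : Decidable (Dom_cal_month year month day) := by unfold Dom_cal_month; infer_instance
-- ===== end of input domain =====

-- B replaces A's repeated-subtraction while loop (plus the separate month == 0 fix-up)
-- with one constant-time floor-division/modulo normalization; objective: simpler.

-- ===== PORT A =====
-- A's 'while month > 12: month -= 12; year += 1' loop, step for step
def calWhileA (year : Int) (month : Int) : Int × Int :=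
  if month > 12 then calWhileA (year + 1) (month - 12) else (year, month)
termination_by month.toNat
decreasing_by omega

def cal_month (year : Int) (month : Int) (day : Int) : List Int :=
  let (month, day) := if day == 1 then (month - 1, 28) else (month, day - 1)
  let p := calWhileA year month
  if p.2 == 0 then [p.1 - 1, 12, day] else [p.1, p.2, day]

-- ===== PORT B =====
def cal_month_alt (year : Int) (month : Int) (day : Int) : List Int :=
  let (month, day) := if day == 1 then (month - 1, 28) else (month, day - 1)
  if month > 12 || month == 0 then
    [year + PySem.Int.floordiv (month - 1) 12, PySem.Int.mod (month - 1) 12 + 1, day]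
  else [year, month, day]

-- ===== PRECONDITION & SPEC =====
def Spec_cal_month (year : Int) (month : Int) (day : Int) (out : List Int) : Prop := out = cal_month_alt year month day
instance (year : Int) (month : Int) (day : Int) (out : List Int) : Decidable (Spec_cal_month year month day out) := by unfold Spec_cal_month; infer_instance

-- ===== CLAIM (what is proved, stated in full; the proofs are below) =====
def Claim_equal_cal_month : Prop := ∀ (year : Int) (month : Int) (day : Int), Dom_cal_month year month day → Spec_cal_month year month day (cal_month year month day)

-- ===== LEMMAS AND PROOFS =====

theorem calWhileA_stop (year month : Int) (h : month ≤ 12) :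
    calWhileA year month = (year, month) := by
  rw [calWhileA, if_neg (by omega)]

-- A's loop, on a month ≥ 1, computes exactly B's closed form.
theorem calWhileA_closed (year month : Int) (h : 1 ≤ month) :
    calWhileA year month
      = (year + PySem.Int.floordiv (month - 1) 12, PySem.Int.mod (month - 1) 12 + 1) := by
  induction year, month using calWhileA.induct with
  | case1 y m hm ih =>
    rw [calWhileA, if_pos hm, ih (by omega)]
    rw [PySem.Int.floordiv_eq_ediv_of_pos (by omega : (0:Int) < 12),
        PySem.Int.floordiv_eq_ediv_of_pos (by omega : (0:Int) < 12),
        PySem.Int.mod_eq_emod_of_pos (by omega : (0:Int) < 12),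
        PySem.Int.mod_eq_emod_of_pos (by omega : (0:Int) < 12)]
    simp only [Prod.mk.injEq]
    omega
  | case2 y m hm =>
    rw [calWhileA, if_neg hm]
    rw [PySem.Int.floordiv_eq_ediv_of_pos (by omega : (0:Int) < 12),
        PySem.Int.mod_eq_emod_of_pos (by omega : (0:Int) < 12)]
    simp only [Prod.mk.injEq]
    omega

-- core equality on the already day-adjusted (year, month): loop + zero fix-up = closed form
theorem core_eq (year month day : Int) :
    (let p := calWhileA year month
     if p.2 == 0 then [p.1 - 1, 12, day] else [p.1, p.2, day])
      = (if month > 12 || month == 0 then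
          [year + PySem.Int.floordiv (month - 1) 12, PySem.Int.mod (month - 1) 12 + 1, day]
         else [year, month, day]) := by
  by_cases hge : 1 ≤ month
  · -- 1 ≤ month: A's loop computes the closed form, and its result is never 0
    rw [calWhileA_closed year month hge]
    have hm : PySem.Int.mod (month - 1) 12 + 1 ≠ 0 := by
      rw [PySem.Int.mod_eq_emod_of_pos (by omega : (0:Int) < 12)]; omega
    simp only [beq_iff_eq, hm, if_false]
    by_cases h12 : month > 12
    · rw [if_pos (by simp [h12])]
    · rw [if_neg (by simp only [Bool.or_eq_true, decide_eq_true_eq, beq_iff_eq, not_or]; omega),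
          PySem.Int.floordiv_eq_ediv_of_pos (by omega : (0:Int) < 12),
          PySem.Int.mod_eq_emod_of_pos (by omega : (0:Int) < 12)]
      simp only [List.cons.injEq, and_true]
      omega
  · -- month ≤ 0: A's loop does not fire
    rw [calWhileA_stop year month (by omega)]
    rcases eq_or_ne month 0 with h0 | h0
    · subst h0
      rw [PySem.Int.floordiv_eq_ediv_of_pos (by omega : (0:Int) < 12),
          PySem.Int.mod_eq_emod_of_pos (by omega : (0:Int) < 12)]
      norm_num
      omega
    · simp only [beq_iff_eq, h0, if_false]
      rw [if_neg (by simp only [Bool.or_eq_true, decide_eq_true_eq, beq_iff_eq, not_or]; omega)]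

-- ===== VERDICT (by name: the statement is the Claim_ definition above) =====
theorem cal_month_spec : Claim_equal_cal_month := by
  intro year month day _
  unfold Spec_cal_month cal_month cal_month_alt
  by_cases hd : day == 1 <;> simp only [hd, if_true] <;> exact core_eq ..
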